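-- pv_equiv track=rewrite | github.com/nipunagarwala/cs224s_final_project | code/utils/preprocess.py | labels_to_int_lookup
-- ===== SOURCE A (Python) =====
-- def labels_to_int_lookup(phone_labels):
--     next_value = 0
--     lookup = {}
--
--     for sample in phone_labels:
--         for phoneme in sample:
--             if phoneme not in lookup:
--                 lookup[phoneme] = next_value
--                 next_value += 1
--
--     return lookup
-- ===== SOURCE B (Python) =====
-- def labels_to_int_lookup(phone_labels):
--     # Selection-style numbering: repeatedly take the first remaining phoneme,
--     # give it the next id, and filter ALL of its occurrences out of the rest.
--     seq = [p for sample in phone_labels for p in sample]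
--     lookup = {}
--     while seq:
--         head = seq[0]
--         lookup[head] = len(lookup)
--         seq = [p for p in seq[1:] if p != head]
--     return lookup
-- ===== Notes on version B (the rewrite author's own statement) =====
-- stated objective: alternative
-- what changed: Replaces the membership-test-plus-counter dict build by a selection-style loop: flatten once, then repeatedly assign the next id to the first remaining phoneme and filter all of its occurrences out of the remainder, so no membership test against the dict is ever made.
import Mathlib
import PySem

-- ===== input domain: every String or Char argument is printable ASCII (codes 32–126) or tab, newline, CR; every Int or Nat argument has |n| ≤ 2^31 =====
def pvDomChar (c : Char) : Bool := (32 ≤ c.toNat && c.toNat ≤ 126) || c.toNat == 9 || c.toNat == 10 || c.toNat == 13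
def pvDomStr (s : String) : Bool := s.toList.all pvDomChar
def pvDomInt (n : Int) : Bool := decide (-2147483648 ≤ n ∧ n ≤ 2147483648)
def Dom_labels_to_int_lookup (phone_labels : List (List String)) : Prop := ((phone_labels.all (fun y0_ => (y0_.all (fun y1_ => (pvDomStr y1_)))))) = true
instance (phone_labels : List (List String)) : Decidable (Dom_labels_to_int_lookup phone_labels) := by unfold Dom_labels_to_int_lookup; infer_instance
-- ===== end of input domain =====

-- B numbers phonemes by selection: flatten once, then repeatedly give the next id to the first
-- remaining phoneme and filter all its occurrences out of the rest (no membership test against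
-- the dict); objective: alternative, same return value.

-- ===== PORT A =====
-- nested for-loops over samples/phonemes, state (next_value, lookup)
def labels_to_int_lookup (phone_labels : List (List String)) : List (String × Int) :=
  let st : Int × PySem.Dict String Int :=
    phone_labels.foldl (fun st sample =>
      sample.foldl (fun st phoneme =>
        if st.2.contains phoneme then st
        else (st.1 + 1, st.2.insert phoneme st.1)) st)
      (0, PySem.Dict.empty)
  st.2.items

-- ===== PORT B =====
-- the while loop: take head, assign len(lookup), filter head out of the tail
def pvBLoop : List String → PySem.Dict String Int → PySem.Dict String Int
  | [], lookup => lookup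
  | head :: t, lookup =>
      pvBLoop (t.filter (fun p => p ≠ head)) (lookup.insert head (lookup.items.length : Int))
termination_by seq => seq.length
decreasing_by
  have h1 := List.length_filter_le (fun (x : {x // x ∈ t}) => !decide (↑x = head)) t.attach
  simp at h1 ⊢
  omega

def labels_to_int_lookup_alt (phone_labels : List (List String)) : List (String × Int) :=
  let seq := phone_labels.flatMap (fun sample => sample.map id)
  (pvBLoop seq PySem.Dict.empty).items

-- ===== PRECONDITION & SPEC =====
def Spec_labels_to_int_lookup (phone_labels : List (List String)) (out : List (String × Int)) : Prop := out = labels_to_int_lookup_alt phone_labels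
instance (phone_labels : List (List String)) (out : List (String × Int)) : Decidable (Spec_labels_to_int_lookup phone_labels out) := by unfold Spec_labels_to_int_lookup; infer_instance

-- ===== CLAIM (what is proved, stated in full; the proofs are below) =====
def Claim_equal_labels_to_int_lookup : Prop := ∀ (phone_labels : List (List String)), Dom_labels_to_int_lookup phone_labels → Spec_labels_to_int_lookup phone_labels (labels_to_int_lookup phone_labels)

-- ===== LEMMAS AND PROOFS =====

-- A's inner loop body, named for the lemmas
def pvStep (st : Int × PySem.Dict String Int) (phoneme : String) : Int × PySem.Dict String Int :=
  if st.2.contains phoneme then st else (st.1 + 1, st.2.insert phoneme st.1)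

-- the dict holding seen[i] ↦ i
def pvD (seen : List String) : PySem.Dict String Int :=
  PySem.Dict.mk ((PySem.List.enumerate seen 0).map (fun p => (p.2, p.1)))

lemma pvD_keys (seen : List String) : (pvD seen).keys = seen := by
  simp only [pvD, PySem.Dict.keys_mk, List.map_map]
  exact PySem.List.map_snd_enumerate seen 0

lemma pvD_contains (seen : List String) (x : String) :
    (pvD seen).contains x = decide (x ∈ seen) := by
  rw [PySem.Dict.contains_eq_decide_mem_keys, pvD_keys]

lemma pvD_items_length (seen : List String) : (pvD seen).items.length = seen.length := by
  simp [pvD, PySem.List.length_enumerate]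

lemma pvD_snoc (seen : List String) (x : String) (hx : x ∉ seen) :
    pvD (seen ++ [x]) = (pvD seen).insert x (seen.length : Int) := by
  apply PySem.Dict.ext
  rw [PySem.Dict.items_insert_of_not_contains]
  · simp [pvD, PySem.List.enumerate_append, PySem.List.enumerate_cons]
  · rw [pvD_contains]
    simpa using hx

lemma pvStep_eq (seen : List String) (x : String) :
    pvStep ((seen.length : Int), pvD seen) x
      = if x ∈ seen then ((seen.length : Int), pvD seen)
        else (((seen ++ [x]).length : Int), pvD (seen ++ [x])) := by
  by_cases hx : x ∈ seen
  · simp [pvStep, pvD_contains, hx]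
  · simp [pvStep, pvD_contains, hx, pvD_snoc seen x hx]

lemma pvNested_eq_flat (l : List (List String)) (st : Int × PySem.Dict String Int) :
    l.foldl (fun st sample => sample.foldl pvStep st) st = (l.flatMap id).foldl pvStep st := by
  induction l generalizing st with
  | nil => rfl
  | cons h t ih => simp [List.flatMap_cons, List.foldl_append, ih]

-- once h is seen, A's loop skips every occurrence of h: filtering them out changes nothing
lemma pvSkip (t : List String) (seen : List String) (h : String) (hh : h ∈ seen) :
    t.foldl pvStep ((seen.length : Int), pvD seen)
      = (t.filter (fun p => p ≠ h)).foldl pvStep ((seen.length : Int), pvD seen) := by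
  induction t generalizing seen with
  | nil => rfl
  | cons x t ih =>
      by_cases hx : x = h
      · subst hx
        have : pvStep ((seen.length : Int), pvD seen) x = ((seen.length : Int), pvD seen) := by
          rw [pvStep_eq]; simp [hh]
        simp [List.foldl_cons, this, ih seen hh]
      · simp only [List.filter_cons, decide_eq_true_eq]
        rw [if_pos (by simpa using hx)]
        simp only [List.foldl_cons]
        rw [pvStep_eq]
        by_cases hx2 : x ∈ seen
        · simp only [if_pos hx2]
          exact ih seen hh
        · simp only [if_neg hx2]
          exact ih (seen ++ [x]) (List.mem_append_left _ hh)

-- B's selection loop computes the same dict as A's fold, for seq disjoint from seen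
lemma pvB (n : Nat) (seq seen : List String) (hn : seq.length ≤ n)
    (hdisj : ∀ x ∈ seq, x ∉ seen) :
    pvBLoop seq (pvD seen) = (seq.foldl pvStep ((seen.length : Int), pvD seen)).2 := by
  induction n generalizing seq seen with
  | zero =>
      have : seq = [] := List.eq_nil_of_length_eq_zero (Nat.le_zero.mp hn)
      subst this; simp [pvBLoop]
  | succ n ih =>
      cases seq with
      | nil => simp [pvBLoop]
      | cons h t =>
          have hh : h ∉ seen := hdisj h (List.mem_cons_self ..)
          have hlhs : pvBLoop (h :: t) (pvD seen)
              = pvBLoop (t.filter (fun p => p ≠ h)) (pvD (seen ++ [h])) := by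
            simp only [pvBLoop, pvD_items_length, pvD_snoc seen h hh]
          rw [hlhs, List.foldl_cons, pvStep_eq, if_neg hh,
              pvSkip t (seen ++ [h]) h (List.mem_append_right _ (List.mem_cons_self ..))]
          apply ih
          · have := List.length_filter_le (fun p => decide (p ≠ h)) t
            have ht : t.length ≤ n := by simpa using Nat.lt_succ_iff.mp (Nat.lt_of_lt_of_le (Nat.lt_succ_of_le le_rfl) hn)
            omega
          · intro x hx
            have hxt := List.mem_of_mem_filter hx
            have hxh : x ≠ h := by simpa using (List.of_mem_filter hx)
            simp only [List.mem_append, List.mem_singleton]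
            exact fun hc => hc.elim (fun h1 => hdisj x (List.mem_cons_of_mem _ hxt) h1) hxh

-- ===== VERDICT (by name: the statement is the Claim_ definition above) =====
theorem labels_to_int_lookup_spec : Claim_equal_labels_to_int_lookup := by
  intro phone_labels _
  show labels_to_int_lookup phone_labels = labels_to_int_lookup_alt phone_labels
  have hA : labels_to_int_lookup phone_labels
      = ((phone_labels.flatMap id).foldl pvStep ((0 : Int), PySem.Dict.empty)).2.items := by
    show (phone_labels.foldl (fun st sample => sample.foldl pvStep st)
          ((0 : Int), PySem.Dict.empty)).2.items = _
    rw [pvNested_eq_flat]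
  have h0 : ((0 : Int), (PySem.Dict.empty : PySem.Dict String Int))
      = ((([] : List String).length : Int), pvD []) := rfl
  have hflat : phone_labels.flatMap (fun sample => sample.map id) = phone_labels.flatMap id := by
    simp
  rw [hA, h0, labels_to_int_lookup_alt, hflat,
      show (PySem.Dict.empty : PySem.Dict String Int) = pvD [] from rfl,
      pvB (phone_labels.flatMap id).length _ [] le_rfl (by simp)]
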